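-- pv_equiv track=rewrite | github.com/pypi-data/pypi-mirror-390 | packages/clia-swe-ai/clia_swe_ai-0.1.3-py3-none-any.whl/swe_tools/utils.py | parse_multiline_commands
-- ===== SOURCE A (Python) =====
-- from collections import defaultdict
-- from typing import List, Dict, Tuple
--
-- def parse_multiline_commands(text: str) -> Dict[str, List[Tuple[int, str]]]:
--     commands = defaultdict(list)
--     current_file = None
--
--     for line in text.strip().split('\n'):
--         stripped_line = line.strip()
--         if stripped_line.startswith('$'):
--             current_file = stripped_line[1:].strip()
--         elif current_file and ':' in line:
--             try:
--                 line_num_str, content = line.split(':', 1)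
--                 line_num = int(line_num_str)
--                 commands[current_file].append((line_num, content))
--             except ValueError:
--                 continue
--     return commands
-- ===== SOURCE B (Python) =====
-- from collections import defaultdict
-- from typing import List, Dict, Tuple
--
-- def parse_multiline_commands(text: str) -> Dict[str, List[Tuple[int, str]]]:
--     commands = defaultdict(list)
--     lines = text.strip().split('\n')
--     n = len(lines)
--     i = 0
--     while i < n:
--         stripped = lines[i].strip()
--         i += 1
--         if not stripped.startswith('$'):
--             continue
--         filename = stripped[1:].strip()
--         body = []
--         while i < n and not lines[i].strip().startswith('$'):
--             body.append(lines[i])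
--             i += 1
--         if not filename:
--             continue
--         for line in body:
--             try:
--                 num_str, content = line.split(':', 1)
--                 num = int(num_str)
--                 commands[filename].append((num, content))
--             except ValueError:
--                 continue
--     return commands
-- ===== Notes on version B (the rewrite author's own statement) =====
-- stated objective: alternative
-- what changed: A's single stateful line scan (current_file carried across iterations, a colon membership test guarding a try) is replaced by a two-level decomposition: an outer loop cutting the line list into header-led sections (header plus takeWhile body) and an inner loop parsing each section body, relying solely on the try/except around split-unpack and int().
import Mathlib
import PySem

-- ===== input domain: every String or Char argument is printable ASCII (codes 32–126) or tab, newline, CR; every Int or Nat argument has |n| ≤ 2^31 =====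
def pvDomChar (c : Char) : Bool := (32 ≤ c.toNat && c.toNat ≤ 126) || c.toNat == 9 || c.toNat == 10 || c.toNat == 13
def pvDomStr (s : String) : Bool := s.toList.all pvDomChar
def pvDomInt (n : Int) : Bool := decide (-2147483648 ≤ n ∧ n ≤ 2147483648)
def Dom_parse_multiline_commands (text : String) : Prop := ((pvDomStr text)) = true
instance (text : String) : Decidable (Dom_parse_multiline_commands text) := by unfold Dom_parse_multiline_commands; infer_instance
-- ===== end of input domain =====

-- B re-decomposes A's single stateful scan into two passes (split into header-led sections,
-- then parse each section body); same result, objective: alternative decomposition.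

-- ===== PORT A =====
-- one step of A's for-loop; state = (commands dict, current_file : Option String)
def pvStepA (st : PySem.Dict String (List (Int × String)) × Option String) (line : String) :
    PySem.Dict String (List (Int × String)) × Option String :=
  let stripped := PySem.Str.strip line
  if PySem.Str.startswith stripped "$" then
    (st.1, some (PySem.Str.strip (PySem.Str.slice stripped (some 1) none)))
  else
    match st.2 with
    | none => st
    | some f =>
      if (!(f == "")) && PySem.Str.isIn ":" line then
        match PySem.Str.splitMax? line ":" 1 with
        | some [numStr, content] =>
          match PySem.Int.ofStr? numStr with
          | some n => (st.1.modify f [] (· ++ [(n, content)]), st.2)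
          | none => st
        | _ => st
      else st

def parse_multiline_commands (text : String) : List (String × List (Int × String)) :=
  let lines := (PySem.Str.split? (PySem.Str.strip text) "\n").getD []
  (lines.foldl pvStepA (PySem.Dict.empty, none)).1.items

-- ===== PORT B =====
-- B's inner for-loop body: parse 'num:content', swallowing ValueError
def pvStepBody (f : String) (d : PySem.Dict String (List (Int × String))) (line : String) :
    PySem.Dict String (List (Int × String)) :=
  match PySem.Str.splitMax? line ":" 1 with
  | some [numStr, content] =>
    match PySem.Int.ofStr? numStr with
    | some n => d.modify f [] (· ++ [(n, content)])
    | none => d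
  | _ => d

-- a line whose stripped form starts with '$' is a section header
def pvIsHeader (line : String) : Bool :=
  PySem.Str.startswith (PySem.Str.strip line) "$"

-- B's outer while-loop: consume one section (header + body via the inner while = takeWhile) at a time
def pvGoB (d : PySem.Dict String (List (Int × String))) : List String →
    PySem.Dict String (List (Int × String))
  | [] => d
  | l :: rest =>
    if pvIsHeader l then
      let fname := PySem.Str.strip (PySem.Str.slice (PySem.Str.strip l) (some 1) none)
      let body := rest.takeWhile (fun x => !pvIsHeader x)
      let rest' := rest.dropWhile (fun x => !pvIsHeader x)
      pvGoB (if fname == "" then d else body.foldl (pvStepBody fname) d) rest'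
    else pvGoB d rest
  termination_by lines => lines.length
  decreasing_by
  · exact Nat.lt_succ_of_le (List.length_dropWhile_le _ _)
  · simp

def parse_multiline_commands_alt (text : String) : List (String × List (Int × String)) :=
  (pvGoB PySem.Dict.empty ((PySem.Str.split? (PySem.Str.strip text) "\n").getD [])).items

-- ===== PRECONDITION & SPEC =====
def Spec_parse_multiline_commands (text : String) (out : List (String × List (Int × String))) : Prop := out = parse_multiline_commands_alt text
instance (text : String) (out : List (String × List (Int × String))) : Decidable (Spec_parse_multiline_commands text out) := by unfold Spec_parse_multiline_commands; infer_instance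

-- ===== CLAIM (what is proved, stated in full; the proofs are below) =====
def Claim_equal_parse_multiline_commands : Prop := ∀ (text : String), Dom_parse_multiline_commands text → Spec_parse_multiline_commands text (parse_multiline_commands text)

-- ===== LEMMAS AND PROOFS =====

-- abbreviation for the induction statement of pvMain (proof-only helper)
def pvH (cf : Option String) (d : PySem.Dict String (List (Int × String)))
    (lines : List String) : PySem.Dict String (List (Int × String)) :=
  match cf with
  | none => pvGoB d lines
  | some f =>
    if f = "" then pvGoB d lines
    else pvGoB ((lines.takeWhile (fun x => !pvIsHeader x)).foldl (pvStepBody f) d)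
           (lines.dropWhile (fun x => !pvIsHeader x))

-- pvGoB skips non-header lines with no section open
lemma pvGoB_dropWhile (d : PySem.Dict String (List (Int × String))) (lines : List String) :
    pvGoB d lines = pvGoB d (lines.dropWhile (fun x => !pvIsHeader x)) := by
  induction lines with
  | nil => rfl
  | cons l rest ih =>
    by_cases h : pvIsHeader l
    · simp [h]
    · rw [pvGoB, if_neg h, List.dropWhile_cons]
      simp only [h, Bool.not_false, if_true]
      exact ih

-- splitOnMax.go finds no separator when the separator occurs nowhere in the input
lemma pvGo_no_infix (sep : List Char) :
    ∀ (fuel m : Nat) (l cur : List Char) (acc : List (List Char)), ¬ sep <:+: l →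
      PySem.Chars.splitOnMax.go sep fuel m l cur acc = ((cur.reverse ++ l) :: acc).reverse := by
  intro fuel
  induction fuel with
  | zero => intro m l cur acc _; rw [PySem.Chars.splitOnMax.go]
  | succ fuel ih =>
    intro m l cur acc h
    match l with
    | [] => rw [PySem.Chars.splitOnMax.go]; simp; omega
    | c :: rest =>
      rw [PySem.Chars.splitOnMax.go]
      have hpre : sep.isPrefixOf (c :: rest) = false := by
        rw [Bool.eq_false_iff]
        intro hT
        exact h (List.isPrefixOf_iff_prefix.mp hT).isInfix
      rw [hpre]
      by_cases hm : m = 0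
      · simp [hm]
      · rw [if_neg hm]
        simp only [Bool.false_eq_true, if_false]
        rw [ih m rest (c :: cur) acc (fun hi => h (hi.trans (List.suffix_cons c rest).isInfix))]
        simp

-- a line with no colon splits into one piece, which pvStepBody ignores
lemma pvStepBody_no_colon (f : String) (d : PySem.Dict String (List (Int × String)))
    (line : String) (h : PySem.Str.isIn ":" line = false) :
    pvStepBody f d line = d := by
  have hsplit : PySem.Str.splitMax? line ":" 1 = some [line] := by
    have hni : ¬ [':'] <:+: line.toList := by
      rw [PySem.Str.isIn_eq] at h
      exact (PySem.Chars.isIn_eq_false_iff _ _).mp h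
    unfold PySem.Str.splitMax? PySem.Chars.splitMax? PySem.Chars.splitOnMax
    rw [show (":" : String).toList = [':'] from rfl]
    rw [if_neg (by simp), if_neg (by norm_num)]
    rw [pvGo_no_infix [':'] _ _ _ _ _ hni]
    simp
  unfold pvStepBody
  rw [hsplit]

-- A's elif step equals B's body step once a non-empty filename is open
lemma pvStepA_some (f : String) (hf : ¬ f = "") (d : PySem.Dict String (List (Int × String)))
    (line : String) (hl : pvIsHeader line = false) :
    pvStepA (d, some f) line = (pvStepBody f d line, some f) := by
  unfold pvIsHeader at hl
  simp only [pvStepA, hl, Bool.false_eq_true, if_false]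
  by_cases hc : PySem.Str.isIn ":" line = true
  · simp only [hf, hc, Bool.and_true, Bool.not_eq_true', beq_eq_false_iff_ne, ne_eq,
      not_false_eq_true, if_true]
    unfold pvStepBody
    cases hs : PySem.Str.splitMax? line ":" 1 with
    | none => simp
    | some parts =>
      match parts with
      | [] => simp
      | [a] => simp
      | [a, b] => simp only []; rcases PySem.Int.ofStr? a with _ | n <;> simp
      | a :: b :: c :: t => simp
  · have hc' : PySem.Str.isIn ":" line = false := by
      cases hx : PySem.Str.isIn ":" line
      · rfl
      · exact absurd hx hc
    rw [pvStepBody_no_colon f d line hc']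
    have hcc : PySem.Chars.isIn [':'] line.toList = false := by
      simpa using hc'
    simp [hcc]

-- the bridge: A's fold, started in any state, equals B's section recursion
lemma pvMain (lines : List String) : ∀ (cf : Option String)
    (d : PySem.Dict String (List (Int × String))),
    (lines.foldl pvStepA (d, cf)).1 = pvH cf d lines := by
  induction lines with
  | nil =>
    intro cf d
    cases cf with
    | none => simp [pvH, pvGoB]
    | some f => by_cases hf : f = "" <;> simp [pvH, hf, pvGoB]
  | cons l rest ih =>
    intro cf d
    rw [List.foldl_cons]
    by_cases hh : pvIsHeader l
    · -- header line: A opens a new current file, B starts a new section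
      have hhc : PySem.Chars.startswith (PySem.Chars.strip l.toList) ['$'] = true := by
        have := hh; unfold pvIsHeader at this; simpa using this
      have hstep : pvStepA (d, cf) l =
          (d, some (PySem.Str.strip (PySem.Str.slice (PySem.Str.strip l) (some 1) none))) := by
        simp [pvStepA, hhc]
      rw [hstep, ih]
      set fn := PySem.Str.strip (PySem.Str.slice (PySem.Str.strip l) (some 1) none) with hfn
      have hgo : pvH (some fn) d rest = pvGoB d (l :: rest) := by
        rw [pvGoB, if_pos hh, ← hfn]
        show pvH (some fn) d rest =
          pvGoB (if (fn == "") = true then d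
                 else List.foldl (pvStepBody fn) d (List.takeWhile (fun x => !pvIsHeader x) rest))
            (List.dropWhile (fun x => !pvIsHeader x) rest)
        by_cases he : fn = ""
        · rw [if_pos (by simpa using he)]
          simp only [pvH, he, if_true]
          exact pvGoB_dropWhile d rest
        · rw [if_neg (by simpa using he)]
          simp only [pvH, he, if_false]
      rw [hgo]
      cases cf with
      | none => rfl
      | some f =>
        by_cases hf : f = ""
        · simp [pvH, hf]
        · simp only [pvH, hf, if_false]
          rw [List.takeWhile_cons, List.dropWhile_cons]
          simp [hh]
    · -- non-header line
      have hnh : (fun x => !pvIsHeader x) l = true := by simp [hh]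
      have hhc : PySem.Chars.startswith (PySem.Chars.strip l.toList) ['$'] = false := by
        have := hh; unfold pvIsHeader at this; simp only [Bool.not_eq_true] at this
        simpa using this
      cases cf with
      | none =>
        have hstep : pvStepA (d, none) l = (d, none) := by
          simp [pvStepA, hhc]
        rw [hstep, ih]
        simp only [pvH]
        rw [pvGoB, if_neg hh]
      | some f =>
        by_cases hf : f = ""
        · have hstep : pvStepA (d, some f) l = (d, some f) := by
            simp [pvStepA, hhc, hf]
          rw [hstep, ih]
          simp only [pvH, hf, if_true]
          rw [pvGoB, if_neg hh]
        · rw [pvStepA_some f hf d l (by simp only [Bool.not_eq_true] at hh; exact hh), ih]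
          simp only [pvH, hf, if_false]
          rw [List.takeWhile_cons, List.dropWhile_cons]
          simp only [hnh, if_true, List.foldl_cons]

-- ===== VERDICT (by name: the statement is the Claim_ definition above) =====
theorem parse_multiline_commands_spec : Claim_equal_parse_multiline_commands := by
  intro text _
  unfold Spec_parse_multiline_commands parse_multiline_commands parse_multiline_commands_alt
  exact congrArg PySem.Dict.items
    (pvMain ((PySem.Str.split? (PySem.Str.strip text) "\n").getD []) none PySem.Dict.empty)
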